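-- pv_equiv track=rewrite | github.com/machkouroke/Smart_Calculator | calculator.py | infix_dissociator
-- ===== SOURCE A (Python) =====
-- operations = {
--     '+': lambda a, b: a + b,
--     '-': lambda a, b: a - b,
--     '*': lambda a, b: a * b,
--     '/': lambda a, b: a // b,
--     '^': lambda a, b: a ** b,
-- }
--
-- def str_to_number(string):
--     """
--     Converts a string of the form '(+/-)1' * n
--     into a list where the digits are dissociated
--     :param string: string of '(+/-)1' * n
--     :return: list where the digits are dissociated
--     """
--     x = 0
--     number = []
--     while x < len(string):
--         if string[x] == '-':
--             number.append(-1)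
--             x += 2
--             continue
--         number.append(string[x])
--         x += 1
--     return number
--
-- def sign_eval(sgn_list):
--     """
--     Evaluate signs and return their equivalent sign
--     :param sgn_list: sign list
--     :return: list of equivalent signs
--     """
--     signe = {'+': 1, '-': -1}
--     new_sgn_list = []
--     for x in sgn_list:
--         if '*' in x or '/' in x or '^' in x:
--             new_sgn_list.append(x)
--         else:
--             x_num = x
--             for a, b in signe.items():
--                 x_num = x_num.replace(a, str(b))
--             x_num = str_to_number(x_num)
--             s = 1
--             for k in x_num:
--                 s *= int(k)
--             new_sgn_list.append('+') if s == 1 else new_sgn_list.append('-')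
--     return new_sgn_list
--
-- def string_dissociator(s):
--     """
--     Separates the expression in tuple of sign and number
--     :param s: expression
--     :return: the tuple containing the list of signs and the list of numbers
--     """
--     signs, number, x = [], [], 0
--     while x < len(s):
--         if s[x] in operations:
--             sig = []
--             for _ in range(x, len(s)):
--                 if s[x] in operations:
--                     sig += s[x]
--                     x += 1
--                     continue
--                 break
--             signs.append(''.join(sig))
--         else:
--             if x == 0:
--                 signs.append('')
--             num = []
--             for _ in range(x, len(s)):
--                 if s[x] not in operations:
--                     num += s[x]
--                     x += 1
--                     continue
--                 break
--             number.append(''.join(num))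
--     signs = sign_eval(signs)
--     return signs, number
--
-- def infix_dissociator(infix):
--     a, b = string_dissociator(infix)
--     new_infix = []
--     for x, y in zip(a, b):
--         new_infix.append(x)
--         if not y.isdigit():
--             if '(' in y:
--                 new_infix.extend(list('(' * y.count('(')))
--             new_infix.append(y.replace('(', '').replace(')', ''))
--             if ')' in y:
--                 new_infix.extend(list(')' * y.count(')')))
--         else:
--             new_infix.append(y)
--     return new_infix[1:]
-- ===== SOURCE B (Python) =====
-- def infix_dissociator(infix):
--     """Single linear scan alternating sign-runs and number-runs; the leading
--     sign (always the first emitted element in A) is simply never emitted."""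
--     SIGNS = '+-*/^'
--     out = []
--     i, n = 0, len(infix)
--     first = True
--     while i < n:
--         j = i
--         while j < n and infix[j] in SIGNS:
--             j += 1
--         run = infix[i:j]
--         i = j
--         if i >= n:
--             break  # trailing sign run: dropped (zip truncation in A)
--         if not first:
--             if '*' in run or '/' in run or '^' in run:
--                 out.append(run)
--             else:
--                 out.append('-' if run.count('-') % 2 else '+')
--         first = False
--         j = i
--         while j < n and infix[j] not in SIGNS:
--             j += 1
--         num = infix[i:j]
--         i = j
--         if num.isdigit():
--             out.append(num)
--         else:
--             out.extend('(' * num.count('('))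
--             out.append(num.replace('(', '').replace(')', ''))
--             out.extend(')' * num.count(')'))
--     return out
-- ===== Notes on version B (the rewrite author's own statement) =====
-- stated objective: simpler
-- what changed: Replaces A's three-phase pipeline (string_dissociator building two lists, sign_eval's replace/str_to_number/product machinery, then a zip-rebuild loop that drops its first element) by one linear index scan that alternates sign-runs and number-runs, reduces a +/- run by the parity of its count of minus signs, and simply never emits the first sign.
import Mathlib
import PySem

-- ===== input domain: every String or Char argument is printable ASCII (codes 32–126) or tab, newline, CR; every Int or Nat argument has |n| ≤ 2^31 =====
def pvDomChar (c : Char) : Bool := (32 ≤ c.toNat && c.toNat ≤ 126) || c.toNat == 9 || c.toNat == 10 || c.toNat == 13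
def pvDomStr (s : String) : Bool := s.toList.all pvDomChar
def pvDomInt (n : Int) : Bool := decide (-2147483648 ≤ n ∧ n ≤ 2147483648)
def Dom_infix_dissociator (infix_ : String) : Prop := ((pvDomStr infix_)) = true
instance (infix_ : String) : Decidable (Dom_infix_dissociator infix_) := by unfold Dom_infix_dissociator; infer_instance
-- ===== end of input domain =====

-- B replaces A's three-phase pipeline (dissociate / sign_eval / zip-rebuild) by one
-- linear scan that alternates sign-runs and number-runs and never emits the first sign
-- (objective: simpler decomposition, same asymptotic cost).

-- ===== PORT A =====

-- membership in the `operations` dict = one of its five keys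
def pvIsOp (c : Char) : Bool := c == '+' || c == '-' || c == '*' || c == '/' || c == '^'

-- str_to_number: '-' appends -1 and skips two chars, otherwise int(char) (only digits reach it)
def pvStrToNumber : List Char → List Int
  | [] => []
  | c :: rest =>
    if c = '-' then -1 :: pvStrToNumber (rest.drop 1)
    else ((c.toNat : Int) - ('0'.toNat : Int)) :: pvStrToNumber rest
  termination_by l => l.length
  decreasing_by
    · simp [List.length_drop]
    · simp

-- sign_eval: keep runs containing * / ^; otherwise substitute +→1, -→-1, parse, multiply
def pvSignEval (l : List String) : List String :=
  l.map (fun x =>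
    let xs := x.toList
    if xs.contains '*' || xs.contains '/' || xs.contains '^' then x
    else
      let xr := xs.flatMap (fun c => if c = '+' then ['1'] else if c = '-' then ['-', '1'] else [c])
      let s := (pvStrToNumber xr).foldl (· * ·) 1
      if s = 1 then "+" else "-")

-- string_dissociator's while loop; `first` tracks x == 0 (the leading '' sign)
def pvSDGo : List Char → Bool → List String × List String
  | [], _ => ([], [])
  | c :: rest, first =>
    if h : pvIsOp c then
      let sig := (c :: rest).takeWhile pvIsOp
      let r := (c :: rest).dropWhile pvIsOp
      let p := pvSDGo r false
      (String.ofList sig :: p.1, p.2)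
    else
      let num := (c :: rest).takeWhile (fun d => !pvIsOp d)
      let r := (c :: rest).dropWhile (fun d => !pvIsOp d)
      let p := pvSDGo r false
      if first then ("" :: p.1, String.ofList num :: p.2) else (p.1, String.ofList num :: p.2)
  termination_by l _ => l.length
  decreasing_by
    · simp [h]
      exact List.length_dropWhile_le _ _
    · simp [h]
      exact List.length_dropWhile_le _ _

def infix_dissociator (infix_ : String) : List String :=
  let p := pvSDGo infix_.toList true
  let a := pvSignEval p.1
  let b := p.2
  let new_infix := (a.zip b).foldl (fun (acc : List String) (xy : String × String) =>
    let x := xy.1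
    let y := xy.2
    let acc := acc ++ [x]
    if !(PySem.Str.strIsdigit y) then
      let acc := if y.toList.contains '(' then acc ++ List.replicate (y.toList.count '(') "(" else acc
      let acc := acc ++ [String.ofList (y.toList.filter (fun c => !(c == '(' || c == ')')))]
      if y.toList.contains ')' then acc ++ List.replicate (y.toList.count ')') ")" else acc
    else acc ++ [y]) []
  new_infix.drop 1

-- ===== PORT B =====

-- number-run emission: all-digit runs verbatim, else '('*k ++ stripped ++ ')'*m
def pvNumPart (num : List Char) : List String :=
  if PySem.Chars.strIsdigit num then [String.ofList num]
  else List.replicate (num.count '(') "("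
       ++ [String.ofList (num.filter (fun c => !(c == '(' || c == ')')))]
       ++ List.replicate (num.count ')') ")"

-- one scan: sign-run then number-run; `first` suppresses the first sign; a trailing
-- sign-run with no number after it yields nothing
def pvAltGo (s : List Char) (first : Bool) : List String :=
  let run := s.takeWhile pvIsOp
  let rest := s.dropWhile pvIsOp
  match h : rest with
  | [] => []
  | _ :: _ =>
    let num := rest.takeWhile (fun d => !pvIsOp d)
    let rest2 := rest.dropWhile (fun d => !pvIsOp d)
    let signPart : List String :=
      if first then []
      else if run.contains '*' || run.contains '/' || run.contains '^' then [String.ofList run]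
      else if run.count '-' % 2 = 1 then ["-"] else ["+"]
    signPart ++ pvNumPart num ++ pvAltGo rest2 false
  termination_by s.length
  decreasing_by
    rename_i c t
    have h1 : rest.length ≤ s.length := List.length_dropWhile_le _ _
    have hc : pvIsOp c = false := by
      have h' : List.dropWhile pvIsOp s = c :: t := h
      have := List.head?_dropWhile_not pvIsOp s
      rw [h'] at this; simpa using this
    have h' : List.dropWhile pvIsOp s = c :: t := h
    have h2 : (List.dropWhile (fun d => !pvIsOp d) (List.dropWhile pvIsOp s)).length < (List.dropWhile pvIsOp s).length := by
      rw [h', List.dropWhile_cons_of_pos (by simp [hc])]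
      exact Nat.lt_succ_of_le (List.length_dropWhile_le _ _)
    have h1' : (List.dropWhile pvIsOp s).length ≤ s.length := List.length_dropWhile_le _ _
    show (List.dropWhile (fun d => !pvIsOp d) (List.dropWhile pvIsOp s)).length < s.length
    omega

def infix_dissociator_alt (infix_ : String) : List String :=
  pvAltGo infix_.toList true

-- ===== PRECONDITION & SPEC =====
def Spec_infix_dissociator (infix_ : String) (out : List String) : Prop := out = infix_dissociator_alt infix_
instance (infix_ : String) (out : List String) : Decidable (Spec_infix_dissociator infix_ out) := by unfold Spec_infix_dissociator; infer_instance

-- ===== CLAIM (what is proved, stated in full; the proofs are below) =====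
def Claim_equal_infix_dissociator : Prop := ∀ (infix_ : String), Dom_infix_dissociator infix_ → Spec_infix_dissociator infix_ (infix_dissociator infix_)

-- ===== LEMMAS AND PROOFS =====

-- what one zip pair contributes to A's fold, number part
def pvEmitNum (y : String) : List String :=
  if !(PySem.Str.strIsdigit y) then
    (if y.toList.contains '(' then List.replicate (y.toList.count '(') "(" else [])
    ++ [String.ofList (y.toList.filter (fun c => !(c == '(' || c == ')')))]
    ++ (if y.toList.contains ')' then List.replicate (y.toList.count ')') ")" else [])
  else [y]

-- the full contribution of A's zip loop, flattened
def pvEmit (pairs : List (String × String)) : List String :=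
  pairs.flatMap (fun xy => xy.1 :: pvEmitNum xy.2)

lemma pvFoldl_emit (pairs : List (String × String)) (acc : List String) :
    pairs.foldl (fun (acc : List String) (xy : String × String) =>
      let x := xy.1
      let y := xy.2
      let acc := acc ++ [x]
      if !(PySem.Str.strIsdigit y) then
        let acc := if y.toList.contains '(' then acc ++ List.replicate (y.toList.count '(') "(" else acc
        let acc := acc ++ [String.ofList (y.toList.filter (fun c => !(c == '(' || c == ')')))]
        if y.toList.contains ')' then acc ++ List.replicate (y.toList.count ')') ")" else acc
      else acc ++ [y]) acc = acc ++ pvEmit pairs := by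
  induction pairs generalizing acc with
  | nil => simp [pvEmit]
  | cons p t ih =>
    simp only [List.foldl_cons, ih, pvEmit, List.flatMap_cons, pvEmitNum]
    split_ifs <;> simp

lemma pvEmitNum_numPart (num : List Char) : pvEmitNum (String.ofList num) = pvNumPart num := by
  simp only [pvEmitNum, pvNumPart, PySem.Str.strIsdigit, String.toList_ofList]
  by_cases hd : PySem.Chars.strIsdigit num = true
  · simp [hd]
  · have hd0 : PySem.Chars.strIsdigit num = false := by simpa using hd
    simp only [hd0, Bool.not_false, if_true, Bool.false_eq_true, if_false]
    by_cases h1 : '(' ∈ num <;> by_cases h2 : ')' ∈ num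
    · simp [h1, h2]
    · have c2 : List.count ')' num = 0 := List.count_eq_zero.mpr h2
      simp [h1, h2, c2]
    · have c1 : List.count '(' num = 0 := List.count_eq_zero.mpr h1
      simp [h1, h2, c1]
    · have c1 : List.count '(' num = 0 := List.count_eq_zero.mpr h1
      have c2 : List.count ')' num = 0 := List.count_eq_zero.mpr h2
      simp [h1, h2, c1, c2]

lemma pvStn_minus (L : List Char) : pvStrToNumber ('-' :: '1' :: L) = -1 :: pvStrToNumber L := by
  rw [pvStrToNumber]; norm_num

lemma pvStn_one (L : List Char) : pvStrToNumber ('1' :: L) = 1 :: pvStrToNumber L := by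
  rw [pvStrToNumber, if_neg (by decide : ¬('1' : Char) = '-')]
  congr 1

-- the +/- substitution A performs before str_to_number
lemma pvStrToNumber_repl (l : List Char) (h : ∀ c ∈ l, c = '+' ∨ c = '-') (a : Int) :
    (pvStrToNumber (l.flatMap (fun c => if c = '+' then ['1'] else if c = '-' then ['-', '1'] else [c]))).foldl (· * ·) a
      = a * (if l.count '-' % 2 = 1 then -1 else 1) := by
  induction l generalizing a with
  | nil => simp [pvStrToNumber]
  | cons c t ih =>
    have ht : ∀ c ∈ t, c = '+' ∨ c = '-' := fun x hx => h x (List.mem_cons_of_mem _ hx)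
    rcases h c (List.mem_cons_self) with hc | hc <;> subst hc
    · rw [List.flatMap_cons, if_pos rfl]
      simp only [List.singleton_append, List.nil_append]
      rw [pvStn_one, List.foldl_cons, ih ht]
      simp [List.count_cons]
    · rw [List.flatMap_cons, if_neg (by decide : ¬('-' : Char) = '+'), if_pos rfl]
      simp only [List.cons_append, List.singleton_append]
      rw [pvStn_minus, List.foldl_cons]
      simp only [List.nil_append]
      rw [ih ht]
      have : ('-' :: t).count '-' = t.count '-' + 1 := by simp [List.count_cons]
      rw [this]
      rcases Nat.even_or_odd (t.count '-') with he | ho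
      · have h1 : t.count '-' % 2 = 0 := Nat.even_iff.mp he
        have h2 : (t.count '-' + 1) % 2 = 1 := by omega
        simp [h1, h2]
      · have h1 : t.count '-' % 2 = 1 := Nat.odd_iff.mp ho
        have h2 : (t.count '-' + 1) % 2 = 0 := by omega
        simp [h1, h2]

-- A's sign_eval on one sign-run equals B's sign reduction
lemma pvSignEval_cons (sig : List Char) (l : List String) (h : ∀ c ∈ sig, pvIsOp c = true) :
    pvSignEval (String.ofList sig :: l)
      = (if sig.contains '*' || sig.contains '/' || sig.contains '^' then String.ofList sig
         else if sig.count '-' % 2 = 1 then "-" else "+") :: pvSignEval l := by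
  rw [pvSignEval, List.map_cons, ← pvSignEval]
  congr 1
  simp only [String.toList_ofList]
  by_cases hs : (sig.contains '*' || sig.contains '/' || sig.contains '^') = true
  · have hs2 : (('*' ∈ sig ∨ '/' ∈ sig) ∨ '^' ∈ sig) := by simpa using hs
    simp [hs, hs2]
  · have hs0 : (sig.contains '*' || sig.contains '/' || sig.contains '^') = false := by
      simpa using hs
    obtain ⟨⟨hn1, hn2⟩, hn3⟩ : ('*' ∉ sig ∧ '/' ∉ sig) ∧ '^' ∉ sig := by simpa using hs0
    have hpm : ∀ c ∈ sig, c = '+' ∨ c = '-' := by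
      intro c hc
      have hop := h c hc
      simp only [pvIsOp, Bool.or_eq_true, beq_iff_eq] at hop
      rcases hop with (((h1 | h1) | h1) | h1) | h1
      · exact Or.inl h1
      · exact Or.inr h1
      · exact absurd (h1 ▸ hc) hn1
      · exact absurd (h1 ▸ hc) hn2
      · exact absurd (h1 ▸ hc) hn3
    have hs2 : ¬ (('*' ∈ sig ∨ '/' ∈ sig) ∨ '^' ∈ sig) := by simpa using hs0
    simp only [hs0, Bool.false_eq_true, if_false, hs2, String.toList_ofList]
    rw [pvStrToNumber_repl sig hpm 1, one_mul]
    split_ifs <;> simp_all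

lemma pvSignEval_nil_cons (l : List String) :
    pvSignEval ("" :: l) = "+" :: pvSignEval l := by
  rw [pvSignEval, List.map_cons, ← pvSignEval]
  congr 1
  simp [pvStrToNumber]

-- heads of dropWhile
lemma pv_head_dropWhile {p : Char → Bool} {s : List Char} {c : Char} {t : List Char}
    (h : s.dropWhile p = c :: t) : p c = false := by
  have := List.head?_dropWhile_not p s
  rw [h] at this; simpa using this

-- unfolding equations for the two loops
lemma pvSDGo_nil (f : Bool) : pvSDGo [] f = ([], []) := by
  rw [pvSDGo]

lemma pvSDGo_op (c : Char) (t : List Char) (f : Bool) (h : pvIsOp c = true) :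
    pvSDGo (c :: t) f =
      (String.ofList ((c :: t).takeWhile pvIsOp) :: (pvSDGo ((c :: t).dropWhile pvIsOp) false).1,
       (pvSDGo ((c :: t).dropWhile pvIsOp) false).2) := by
  rw [pvSDGo]
  simp [h]

lemma pvSDGo_num (c : Char) (t : List Char) (f : Bool) (h : pvIsOp c = false) :
    pvSDGo (c :: t) f =
      (if f then ("" :: (pvSDGo ((c :: t).dropWhile (fun d => !pvIsOp d)) false).1,
                  String.ofList ((c :: t).takeWhile (fun d => !pvIsOp d)) :: (pvSDGo ((c :: t).dropWhile (fun d => !pvIsOp d)) false).2)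
       else ((pvSDGo ((c :: t).dropWhile (fun d => !pvIsOp d)) false).1,
             String.ofList ((c :: t).takeWhile (fun d => !pvIsOp d)) :: (pvSDGo ((c :: t).dropWhile (fun d => !pvIsOp d)) false).2)) := by
  rw [pvSDGo]
  simp [h]

lemma pvAltGo_drop_nil (s : List Char) (f : Bool) (h : s.dropWhile pvIsOp = []) :
    pvAltGo s f = [] := by
  rw [pvAltGo]
  split
  · rfl
  · rename_i c t heq
    rw [h] at heq
    exact absurd heq (by simp)

lemma pvAltGo_drop_cons (s : List Char) (f : Bool) (c : Char) (t : List Char)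
    (h : s.dropWhile pvIsOp = c :: t) :
    pvAltGo s f =
      (if f then []
       else if (s.takeWhile pvIsOp).contains '*' || (s.takeWhile pvIsOp).contains '/' || (s.takeWhile pvIsOp).contains '^'
         then [String.ofList (s.takeWhile pvIsOp)]
       else if (s.takeWhile pvIsOp).count '-' % 2 = 1 then ["-"] else ["+"])
      ++ pvNumPart ((c :: t).takeWhile (fun d => !pvIsOp d))
      ++ pvAltGo ((c :: t).dropWhile (fun d => !pvIsOp d)) false := by
  rw [pvAltGo]
  split
  · rename_i heq
    rw [h] at heq
    exact absurd heq (by simp)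
  · rename_i c' t' heq
    rw [h] at heq
    obtain ⟨rfl, rfl⟩ : c' = c ∧ t' = t := by
      injection heq with h1 h2
      exact ⟨h1.symm, h2.symm⟩
    rw [h]

-- chars of an operator run are operators
lemma pv_mem_takeWhile (l : List Char) : ∀ c ∈ l.takeWhile pvIsOp, pvIsOp c = true :=
  fun _ hc => List.mem_takeWhile_imp hc

-- the main loop correspondence on suffixes that start with an operator (or are empty)
lemma pvMain (n : Nat) : ∀ s : List Char, s.length ≤ n →
    (∀ c t, s = c :: t → pvIsOp c = true) →
    pvEmit ((pvSignEval (pvSDGo s false).1).zip (pvSDGo s false).2) = pvAltGo s false := by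
  induction n with
  | zero =>
    intro s hl _
    have hs : s = [] := List.eq_nil_of_length_eq_zero (Nat.le_zero.mp hl)
    subst hs
    rw [pvSDGo_nil, pvAltGo_drop_nil [] false (by simp)]
    simp [pvSignEval, pvEmit]
  | succ n ih =>
    intro s hl hg
    match s with
    | [] =>
      rw [pvSDGo_nil, pvAltGo_drop_nil [] false (by simp)]
      simp [pvSignEval, pvEmit]
    | c :: t =>
      have hc : pvIsOp c = true := hg c t rfl
      rw [pvSDGo_op c t false hc]
      cases hrr : (c :: t).dropWhile pvIsOp with
      | nil =>
        rw [pvSDGo_nil, pvAltGo_drop_nil (c :: t) false hrr]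
        simp [pvEmit, pvSignEval]
      | cons d u =>
        have hd : pvIsOp d = false := pv_head_dropWhile hrr
        rw [pvSDGo_num d u false hd]
        simp only [Bool.false_eq_true, if_false]
        rw [pvSignEval_cons _ _ (pv_mem_takeWhile (c :: t))]
        rw [List.zip_cons_cons]
        rw [pvEmit, List.flatMap_cons, ← pvEmit, pvEmitNum_numPart]
        -- lengths for the induction hypothesis
        have hlen1 : ((c :: t).dropWhile pvIsOp).length ≤ t.length := by
          rw [List.dropWhile_cons_of_pos (by simp [hc])]
          exact List.length_dropWhile_le _ _
        have hlen2 : ((d :: u).dropWhile (fun d => !pvIsOp d)).length ≤ u.length := by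
          rw [List.dropWhile_cons_of_pos (by simp [hd])]
          exact List.length_dropWhile_le _ _
        have hlen3 : ((d :: u).dropWhile (fun d => !pvIsOp d)).length ≤ n := by
          rw [hrr] at hlen1
          simp only [List.length_cons] at hlen1 hl
          omega
        have hguard : ∀ c' t', (d :: u).dropWhile (fun d => !pvIsOp d) = c' :: t' →
            pvIsOp c' = true := by
          intro c' t' h'
          have := pv_head_dropWhile h'
          simpa using this
        rw [ih _ hlen3 hguard]
        rw [pvAltGo_drop_cons (c :: t) false d u hrr]
        simp only [Bool.false_eq_true, if_false, List.cons_append, List.nil_append,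
          List.append_assoc]
        split_ifs <;> simp

-- A, rewritten through pvEmit
lemma pvA_emit (s : String) :
    infix_dissociator s =
      (pvEmit ((pvSignEval (pvSDGo s.toList true).1).zip (pvSDGo s.toList true).2)).drop 1 := by
  rw [infix_dissociator]
  rw [pvFoldl_emit]
  rw [List.nil_append]

-- ===== VERDICT (by name: the statement is the Claim_ definition above) =====
theorem infix_dissociator_spec : Claim_equal_infix_dissociator := by
  intro infix_ _
  show infix_dissociator infix_ = infix_dissociator_alt infix_
  rw [pvA_emit, infix_dissociator_alt]
  cases hs : infix_.toList with
  | nil =>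
    rw [pvSDGo_nil, pvAltGo_drop_nil [] true (by simp)]
    simp [pvSignEval, pvEmit]
  | cons c t =>
    by_cases hc : pvIsOp c = true
    · rw [pvSDGo_op c t true hc]
      cases hrr : (c :: t).dropWhile pvIsOp with
      | nil =>
        rw [pvSDGo_nil, pvAltGo_drop_nil (c :: t) true hrr]
        simp [pvEmit, pvSignEval]
      | cons d u =>
        have hd : pvIsOp d = false := pv_head_dropWhile hrr
        rw [pvSDGo_num d u false hd]
        simp only [Bool.false_eq_true, if_false]
        rw [pvSignEval_cons _ _ (pv_mem_takeWhile (c :: t))]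
        rw [List.zip_cons_cons]
        rw [pvEmit, List.flatMap_cons, ← pvEmit, pvEmitNum_numPart]
        have hguard : ∀ c' t', (d :: u).dropWhile (fun d => !pvIsOp d) = c' :: t' →
            pvIsOp c' = true := by
          intro c' t' h'
          have := pv_head_dropWhile h'
          simpa using this
        rw [pvMain ((d :: u).dropWhile (fun d => !pvIsOp d)).length _ le_rfl hguard]
        rw [pvAltGo_drop_cons (c :: t) true d u hrr]
        simp
    · have hc0 : pvIsOp c = false := by simpa using hc
      rw [pvSDGo_num c t true hc0]
      simp only [if_true]
      rw [pvSignEval_nil_cons, List.zip_cons_cons]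
      rw [pvEmit, List.flatMap_cons, ← pvEmit, pvEmitNum_numPart]
      have hguard : ∀ c' t', (c :: t).dropWhile (fun d => !pvIsOp d) = c' :: t' →
          pvIsOp c' = true := by
        intro c' t' h'
        have := pv_head_dropWhile h'
        simpa using this
      rw [pvMain ((c :: t).dropWhile (fun d => !pvIsOp d)).length _ le_rfl hguard]
      have hdrop : (c :: t).dropWhile pvIsOp = c :: t := List.dropWhile_cons_of_neg (by simp [hc0])
      rw [pvAltGo_drop_cons (c :: t) true c t hdrop]
      simp
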